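-- pv_equiv track=rewrite | github.com/anirudhkaushal/coding_practice | 2d-arrays/q1_sumOfZeroes.py | coverageOfMatrix
-- ===== SOURCE A (Python) =====
-- def coverageOfMatrix(mat):
--
--     n = len(mat)
--     m = len(mat[0])
--
--     count = 0
--
--     for i in range(n):
--         for j in range(m):
--             if mat[i][j] == 0:
--                     if i-1 >= 0 and mat[i-1][j] == 1:
--                         count += 1
--
--                     if i+1 < n and mat[i+1][j] == 1:
--                         count += 1
--
--                     if j-1 >= 0 and mat[i][j-1] == 1:
--                         count += 1
--
--                     if j+1 < m and mat[i][j+1] == 1: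
--                         count += 1
--
--     return count
-- ===== SOURCE B (Python) =====
-- def coverageOfMatrix(mat):
--     n = len(mat)
--     m = len(mat[0])
--     count = 0
--     for i in range(n):
--         for j in range(m):
--             a = mat[i][j]
--             if j + 1 < m:
--                 b = mat[i][j + 1]
--                 if (a == 0 and b == 1) or (a == 1 and b == 0):
--                     count += 1
--             if i + 1 < n:
--                 b = mat[i + 1][j]
--                 if (a == 0 and b == 1) or (a == 1 and b == 0):
--                     count += 1
--     return count
-- ===== Notes on version B (the rewrite author's own statement) =====
-- stated objective: alternative
-- what changed: B counts each grid edge once (right/down neighbor per cell, incrementing when the pair of values is exactly {0,1}) instead of A's scan of all four neighbors of every 0-cell.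
import Mathlib
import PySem

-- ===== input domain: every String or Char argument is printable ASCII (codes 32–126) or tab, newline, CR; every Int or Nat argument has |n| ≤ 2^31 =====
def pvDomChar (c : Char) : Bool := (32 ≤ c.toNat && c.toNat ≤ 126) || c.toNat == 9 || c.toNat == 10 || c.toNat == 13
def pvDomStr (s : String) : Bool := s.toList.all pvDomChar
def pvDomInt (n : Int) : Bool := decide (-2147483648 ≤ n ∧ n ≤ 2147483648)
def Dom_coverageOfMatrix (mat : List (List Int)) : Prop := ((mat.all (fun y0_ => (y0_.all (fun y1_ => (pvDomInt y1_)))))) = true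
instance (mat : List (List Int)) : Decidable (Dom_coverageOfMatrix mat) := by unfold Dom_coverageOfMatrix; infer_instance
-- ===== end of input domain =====

-- B counts each grid edge once (right/down neighbor per cell, pair of values exactly {0,1})
-- instead of A's scan of all four neighbors of every 0-cell; objective: alternative decomposition.

-- ===== PORT A =====
def coverageOfMatrix (mat : List (List Int)) : Int :=
  let n : Int := mat.length
  let m : Int := (PySem.List.pyGetD mat 0 []).length
  (PySem.List.pyRange 0 n 1).foldl (fun count i =>
    (PySem.List.pyRange 0 m 1).foldl (fun count j =>
      if PySem.List.pyGetD (PySem.List.pyGetD mat i []) j 0 = 0 then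
        let count := if i - 1 ≥ 0 ∧ PySem.List.pyGetD (PySem.List.pyGetD mat (i-1) []) j 0 = 1 then count + 1 else count
        let count := if i + 1 < n ∧ PySem.List.pyGetD (PySem.List.pyGetD mat (i+1) []) j 0 = 1 then count + 1 else count
        let count := if j - 1 ≥ 0 ∧ PySem.List.pyGetD (PySem.List.pyGetD mat i []) (j-1) 0 = 1 then count + 1 else count
        let count := if j + 1 < m ∧ PySem.List.pyGetD (PySem.List.pyGetD mat i []) (j+1) 0 = 1 then count + 1 else count
        count
      else count) count) 0

-- ===== PORT B =====
def coverageOfMatrix_alt (mat : List (List Int)) : Int :=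
  let n : Int := mat.length
  let m : Int := (PySem.List.pyGetD mat 0 []).length
  (PySem.List.pyRange 0 n 1).foldl (fun count i =>
    (PySem.List.pyRange 0 m 1).foldl (fun count j =>
      let a := PySem.List.pyGetD (PySem.List.pyGetD mat i []) j 0
      let count := if j + 1 < m then
          let b := PySem.List.pyGetD (PySem.List.pyGetD mat i []) (j+1) 0
          if (a = 0 ∧ b = 1) ∨ (a = 1 ∧ b = 0) then count + 1 else count
        else count
      let count := if i + 1 < n then
          let b := PySem.List.pyGetD (PySem.List.pyGetD mat (i+1) []) j 0
          if (a = 0 ∧ b = 1) ∨ (a = 1 ∧ b = 0) then count + 1 else count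
        else count
      count) count) 0

-- ===== PRECONDITION & SPEC =====
-- Pre_ excludes exactly the inputs on which the Python A raises IndexError:
-- the empty matrix (mat[0]) and matrices with a row shorter than the first row.
def Pre_coverageOfMatrix (mat : List (List Int)) : Prop :=
  mat ≠ [] ∧ ∀ row ∈ mat, (mat.getD 0 []).length ≤ row.length
instance (mat : List (List Int)) : Decidable (Pre_coverageOfMatrix mat) := by
  unfold Pre_coverageOfMatrix; infer_instance
def pvWitness_coverageOfMatrix : List (List Int) := [[0, 1, 2], [1, 0, 1]]

def Spec_coverageOfMatrix (mat : List (List Int)) (out : Int) : Prop := out = coverageOfMatrix_alt mat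
instance (mat : List (List Int)) (out : Int) : Decidable (Spec_coverageOfMatrix mat out) := by unfold Spec_coverageOfMatrix; infer_instance

-- ===== CLAIM (what is proved, stated in full; the proofs are below) =====
def Claim_equal_coverageOfMatrix : Prop := ∀ (mat : List (List Int)), Dom_coverageOfMatrix mat → Pre_coverageOfMatrix mat → Spec_coverageOfMatrix mat (coverageOfMatrix mat)

-- ===== LEMMAS AND PROOFS =====

-- the matrix read with total (0-default) lookups, Nat indices
def pvG (mat : List (List Int)) (i j : ℕ) : ℤ := (mat.getD i []).getD j 0

-- A's per-cell contribution, Int indices (exactly the four guarded increments)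
def pvTA (mat : List (List Int)) (i j : ℤ) : ℤ :=
  if PySem.List.pyGetD (PySem.List.pyGetD mat i []) j 0 = 0 then
    (if i - 1 ≥ 0 ∧ PySem.List.pyGetD (PySem.List.pyGetD mat (i-1) []) j 0 = 1 then 1 else 0)
    + (if i + 1 < (mat.length : ℤ) ∧ PySem.List.pyGetD (PySem.List.pyGetD mat (i+1) []) j 0 = 1 then 1 else 0)
    + (if j - 1 ≥ 0 ∧ PySem.List.pyGetD (PySem.List.pyGetD mat i []) (j-1) 0 = 1 then 1 else 0)
    + (if j + 1 < ((PySem.List.pyGetD mat 0 []).length : ℤ) ∧ PySem.List.pyGetD (PySem.List.pyGetD mat i []) (j+1) 0 = 1 then 1 else 0)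
  else 0

-- B's per-cell contribution, Int indices (right edge + down edge)
def pvTB (mat : List (List Int)) (i j : ℤ) : ℤ :=
  (if j + 1 < ((PySem.List.pyGetD mat 0 []).length : ℤ) ∧
      ((PySem.List.pyGetD (PySem.List.pyGetD mat i []) j 0 = 0 ∧ PySem.List.pyGetD (PySem.List.pyGetD mat i []) (j+1) 0 = 1) ∨
       (PySem.List.pyGetD (PySem.List.pyGetD mat i []) j 0 = 1 ∧ PySem.List.pyGetD (PySem.List.pyGetD mat i []) (j+1) 0 = 0)) then 1 else 0)
  + (if i + 1 < (mat.length : ℤ) ∧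
      ((PySem.List.pyGetD (PySem.List.pyGetD mat i []) j 0 = 0 ∧ PySem.List.pyGetD (PySem.List.pyGetD mat (i+1) []) j 0 = 1) ∨
       (PySem.List.pyGetD (PySem.List.pyGetD mat i []) j 0 = 1 ∧ PySem.List.pyGetD (PySem.List.pyGetD mat (i+1) []) j 0 = 0)) then 1 else 0)

lemma pv_listsum {f : ℕ → ℤ} (n : ℕ) : ((List.range n).map f).sum = ∑ k ∈ Finset.range n, f k := by
  induction n with
  | zero => simp
  | succ k ih => simp [List.range_succ, Finset.sum_range_succ, ih]

lemma A_eq_sum (mat : List (List Int)) :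
    coverageOfMatrix mat =
      ∑ i ∈ Finset.range mat.length, ∑ j ∈ Finset.range (mat.getD 0 []).length, pvTA mat ↑i ↑j := by
  have hm : (PySem.List.pyGetD mat 0 []).length = (mat.getD 0 []).length := by
    rw [PySem.List.pyGetD_zero]
  have hinner : ∀ (i c : ℤ),
      (PySem.List.pyRange 0 (((PySem.List.pyGetD mat 0 []).length : ℕ) : ℤ) 1).foldl (fun count j =>
        if PySem.List.pyGetD (PySem.List.pyGetD mat i []) j 0 = 0 then
          let count := if i - 1 ≥ 0 ∧ PySem.List.pyGetD (PySem.List.pyGetD mat (i-1) []) j 0 = 1 then count + 1 else count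
          let count := if i + 1 < (mat.length : ℤ) ∧ PySem.List.pyGetD (PySem.List.pyGetD mat (i+1) []) j 0 = 1 then count + 1 else count
          let count := if j - 1 ≥ 0 ∧ PySem.List.pyGetD (PySem.List.pyGetD mat i []) (j-1) 0 = 1 then count + 1 else count
          let count := if j + 1 < ((PySem.List.pyGetD mat 0 []).length : ℤ) ∧ PySem.List.pyGetD (PySem.List.pyGetD mat i []) (j+1) 0 = 1 then count + 1 else count
          count
        else count) c
      = c + ∑ j ∈ Finset.range (mat.getD 0 []).length, pvTA mat i ↑j := by
    intro i c
    have hb : (fun (count j : ℤ) =>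
        if PySem.List.pyGetD (PySem.List.pyGetD mat i []) j 0 = 0 then
          let count := if i - 1 ≥ 0 ∧ PySem.List.pyGetD (PySem.List.pyGetD mat (i-1) []) j 0 = 1 then count + 1 else count
          let count := if i + 1 < (mat.length : ℤ) ∧ PySem.List.pyGetD (PySem.List.pyGetD mat (i+1) []) j 0 = 1 then count + 1 else count
          let count := if j - 1 ≥ 0 ∧ PySem.List.pyGetD (PySem.List.pyGetD mat i []) (j-1) 0 = 1 then count + 1 else count
          let count := if j + 1 < ((PySem.List.pyGetD mat 0 []).length : ℤ) ∧ PySem.List.pyGetD (PySem.List.pyGetD mat i []) (j+1) 0 = 1 then count + 1 else count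
          count
        else count)
        = fun count j => count + pvTA mat i j := by
      funext count j
      rw [pvTA]
      split_ifs <;> ring
    rw [hb, PySem.List.foldl_add, PySem.List.pyRange_zero_nat, List.map_map]
    rw [show ((fun x => pvTA mat i x) ∘ fun (k : ℕ) => (k : ℤ)) = fun (k : ℕ) => pvTA mat i ↑k from rfl]
    rw [pv_listsum, hm]
  show (PySem.List.pyRange 0 ((mat.length : ℕ) : ℤ) 1).foldl (fun count i =>
      (PySem.List.pyRange 0 (((PySem.List.pyGetD mat 0 []).length : ℕ) : ℤ) 1).foldl (fun count j =>
        if PySem.List.pyGetD (PySem.List.pyGetD mat i []) j 0 = 0 then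
          let count := if i - 1 ≥ 0 ∧ PySem.List.pyGetD (PySem.List.pyGetD mat (i-1) []) j 0 = 1 then count + 1 else count
          let count := if i + 1 < (mat.length : ℤ) ∧ PySem.List.pyGetD (PySem.List.pyGetD mat (i+1) []) j 0 = 1 then count + 1 else count
          let count := if j - 1 ≥ 0 ∧ PySem.List.pyGetD (PySem.List.pyGetD mat i []) (j-1) 0 = 1 then count + 1 else count
          let count := if j + 1 < ((PySem.List.pyGetD mat 0 []).length : ℤ) ∧ PySem.List.pyGetD (PySem.List.pyGetD mat i []) (j+1) 0 = 1 then count + 1 else count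
          count
        else count) count) 0 = _
  have ho : (fun (count i : ℤ) =>
      (PySem.List.pyRange 0 (((PySem.List.pyGetD mat 0 []).length : ℕ) : ℤ) 1).foldl (fun count j =>
        if PySem.List.pyGetD (PySem.List.pyGetD mat i []) j 0 = 0 then
          let count := if i - 1 ≥ 0 ∧ PySem.List.pyGetD (PySem.List.pyGetD mat (i-1) []) j 0 = 1 then count + 1 else count
          let count := if i + 1 < (mat.length : ℤ) ∧ PySem.List.pyGetD (PySem.List.pyGetD mat (i+1) []) j 0 = 1 then count + 1 else count
          let count := if j - 1 ≥ 0 ∧ PySem.List.pyGetD (PySem.List.pyGetD mat i []) (j-1) 0 = 1 then count + 1 else count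
          let count := if j + 1 < ((PySem.List.pyGetD mat 0 []).length : ℤ) ∧ PySem.List.pyGetD (PySem.List.pyGetD mat i []) (j+1) 0 = 1 then count + 1 else count
          count
        else count) count)
      = fun count i => count + ∑ j ∈ Finset.range (mat.getD 0 []).length, pvTA mat i ↑j := by
    funext count i
    exact hinner i count
  rw [ho, PySem.List.foldl_add, PySem.List.pyRange_zero_nat, List.map_map]
  rw [show ((fun x => ∑ j ∈ Finset.range (mat.getD 0 []).length, pvTA mat x ↑j) ∘ fun (k : ℕ) => (k : ℤ)) = fun (k : ℕ) => ∑ j ∈ Finset.range (mat.getD 0 []).length, pvTA mat ↑k ↑j from rfl]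
  rw [pv_listsum, zero_add]

lemma pv_and_ite (c P : Prop) [Decidable c] [Decidable P] :
    (if c ∧ P then (1:ℤ) else 0) = (if c then (if P then (1:ℤ) else 0) else 0) := by
  split_ifs <;> first | rfl | tauto

lemma B_eq_sum (mat : List (List Int)) :
    coverageOfMatrix_alt mat =
      ∑ i ∈ Finset.range mat.length, ∑ j ∈ Finset.range (mat.getD 0 []).length, pvTB mat ↑i ↑j := by
  have hm : (PySem.List.pyGetD mat 0 []).length = (mat.getD 0 []).length := by
    rw [PySem.List.pyGetD_zero]
  have hinner : ∀ (i c : ℤ),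
      (PySem.List.pyRange 0 (((PySem.List.pyGetD mat 0 []).length : ℕ) : ℤ) 1).foldl (fun count j =>
        let a := PySem.List.pyGetD (PySem.List.pyGetD mat i []) j 0
        let count := if j + 1 < ((PySem.List.pyGetD mat 0 []).length : ℤ) then
            let b := PySem.List.pyGetD (PySem.List.pyGetD mat i []) (j+1) 0
            if (a = 0 ∧ b = 1) ∨ (a = 1 ∧ b = 0) then count + 1 else count
          else count
        let count := if i + 1 < (mat.length : ℤ) then
            let b := PySem.List.pyGetD (PySem.List.pyGetD mat (i+1) []) j 0
            if (a = 0 ∧ b = 1) ∨ (a = 1 ∧ b = 0) then count + 1 else count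
          else count
        count) c
      = c + ∑ j ∈ Finset.range (mat.getD 0 []).length, pvTB mat i ↑j := by
    intro i c
    have hb : (fun (count j : ℤ) =>
        let a := PySem.List.pyGetD (PySem.List.pyGetD mat i []) j 0
        let count := if j + 1 < ((PySem.List.pyGetD mat 0 []).length : ℤ) then
            let b := PySem.List.pyGetD (PySem.List.pyGetD mat i []) (j+1) 0
            if (a = 0 ∧ b = 1) ∨ (a = 1 ∧ b = 0) then count + 1 else count
          else count
        let count := if i + 1 < (mat.length : ℤ) then
            let b := PySem.List.pyGetD (PySem.List.pyGetD mat (i+1) []) j 0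
            if (a = 0 ∧ b = 1) ∨ (a = 1 ∧ b = 0) then count + 1 else count
          else count
        count)
        = fun count j => count + pvTB mat i j := by
      funext count j
      simp only [pvTB, pv_and_ite]
      split_ifs <;> ring
    rw [hb, PySem.List.foldl_add, PySem.List.pyRange_zero_nat, List.map_map]
    rw [show ((fun x => pvTB mat i x) ∘ fun (k : ℕ) => (k : ℤ)) = fun (k : ℕ) => pvTB mat i ↑k from rfl]
    rw [pv_listsum, hm]
  show (PySem.List.pyRange 0 ((mat.length : ℕ) : ℤ) 1).foldl (fun count i =>
      (PySem.List.pyRange 0 (((PySem.List.pyGetD mat 0 []).length : ℕ) : ℤ) 1).foldl (fun count j =>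
        let a := PySem.List.pyGetD (PySem.List.pyGetD mat i []) j 0
        let count := if j + 1 < ((PySem.List.pyGetD mat 0 []).length : ℤ) then
            let b := PySem.List.pyGetD (PySem.List.pyGetD mat i []) (j+1) 0
            if (a = 0 ∧ b = 1) ∨ (a = 1 ∧ b = 0) then count + 1 else count
          else count
        let count := if i + 1 < (mat.length : ℤ) then
            let b := PySem.List.pyGetD (PySem.List.pyGetD mat (i+1) []) j 0
            if (a = 0 ∧ b = 1) ∨ (a = 1 ∧ b = 0) then count + 1 else count
          else count
        count) count) 0 = _
  have ho : (fun (count i : ℤ) =>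
      (PySem.List.pyRange 0 (((PySem.List.pyGetD mat 0 []).length : ℕ) : ℤ) 1).foldl (fun count j =>
        let a := PySem.List.pyGetD (PySem.List.pyGetD mat i []) j 0
        let count := if j + 1 < ((PySem.List.pyGetD mat 0 []).length : ℤ) then
            let b := PySem.List.pyGetD (PySem.List.pyGetD mat i []) (j+1) 0
            if (a = 0 ∧ b = 1) ∨ (a = 1 ∧ b = 0) then count + 1 else count
          else count
        let count := if i + 1 < (mat.length : ℤ) then
            let b := PySem.List.pyGetD (PySem.List.pyGetD mat (i+1) []) j 0
            if (a = 0 ∧ b = 1) ∨ (a = 1 ∧ b = 0) then count + 1 else count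
          else count
        count) count)
      = fun count i => count + ∑ j ∈ Finset.range (mat.getD 0 []).length, pvTB mat i ↑j := by
    funext count i
    exact hinner i count
  rw [ho, PySem.List.foldl_add, PySem.List.pyRange_zero_nat, List.map_map]
  rw [show ((fun x => ∑ j ∈ Finset.range (mat.getD 0 []).length, pvTB mat x ↑j) ∘ fun (k : ℕ) => (k : ℤ)) = fun (k : ℕ) => ∑ j ∈ Finset.range (mat.getD 0 []).length, pvTB mat ↑k ↑j from rfl]
  rw [pv_listsum, zero_add]

lemma pvTA_cast (mat : List (List Int)) (i j : ℕ) :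
    pvTA mat ↑i ↑j =
      (if pvG mat i j = 0 ∧ 1 ≤ i ∧ pvG mat (i-1) j = 1 then (1:ℤ) else 0)
      + (if pvG mat i j = 0 ∧ i+1 < mat.length ∧ pvG mat (i+1) j = 1 then 1 else 0)
      + (if pvG mat i j = 0 ∧ 1 ≤ j ∧ pvG mat i (j-1) = 1 then 1 else 0)
      + (if pvG mat i j = 0 ∧ j+1 < (mat.getD 0 []).length ∧ pvG mat i (j+1) = 1 then 1 else 0) := by
  have hg : ∀ a b : ℕ, PySem.List.pyGetD (PySem.List.pyGetD mat (↑a) []) (↑b) 0 = pvG mat a b := by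
    intro a b; simp [pvG, PySem.List.pyGetD_natCast]
  have hup : ((↑i:ℤ) - 1 ≥ 0 ∧ PySem.List.pyGetD (PySem.List.pyGetD mat ((↑i:ℤ)-1) []) (↑j) 0 = 1)
      ↔ (1 ≤ i ∧ pvG mat (i-1) j = 1) := by
    by_cases hi : 1 ≤ i
    · have e : ((i:ℤ) - 1) = ((i-1 : ℕ) : ℤ) := by omega
      rw [e, hg]
      constructor
      · exact fun ⟨_, h2⟩ => ⟨hi, h2⟩
      · exact fun ⟨_, h2⟩ => ⟨by positivity, h2⟩
    · constructor
      · exact fun ⟨h1, _⟩ => absurd h1 (by omega)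
      · exact fun ⟨h1, _⟩ => absurd h1 hi
  have hdown : ((↑i:ℤ) + 1 < (mat.length:ℤ) ∧ PySem.List.pyGetD (PySem.List.pyGetD mat ((↑i:ℤ)+1) []) (↑j) 0 = 1)
      ↔ (i+1 < mat.length ∧ pvG mat (i+1) j = 1) := by
    have e : ((i:ℤ) + 1) = ((i+1 : ℕ) : ℤ) := by omega
    rw [e, hg]
    constructor
    · exact fun ⟨h1, h2⟩ => ⟨by exact_mod_cast h1, h2⟩
    · exact fun ⟨h1, h2⟩ => ⟨by exact_mod_cast h1, h2⟩
  have hleft : ((↑j:ℤ) - 1 ≥ 0 ∧ PySem.List.pyGetD (PySem.List.pyGetD mat (↑i) []) ((↑j:ℤ)-1) 0 = 1)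
      ↔ (1 ≤ j ∧ pvG mat i (j-1) = 1) := by
    by_cases hj : 1 ≤ j
    · have e : ((j:ℤ) - 1) = ((j-1 : ℕ) : ℤ) := by omega
      rw [e, hg]
      constructor
      · exact fun ⟨_, h2⟩ => ⟨hj, h2⟩
      · exact fun ⟨_, h2⟩ => ⟨by positivity, h2⟩
    · constructor
      · exact fun ⟨h1, _⟩ => absurd h1 (by omega)
      · exact fun ⟨h1, _⟩ => absurd h1 hj
  have hm : (PySem.List.pyGetD mat 0 []).length = (mat.getD 0 []).length := by
    rw [PySem.List.pyGetD_zero]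
  have hright : ((↑j:ℤ) + 1 < ((PySem.List.pyGetD mat 0 []).length:ℤ) ∧ PySem.List.pyGetD (PySem.List.pyGetD mat (↑i) []) ((↑j:ℤ)+1) 0 = 1)
      ↔ (j+1 < (mat.getD 0 []).length ∧ pvG mat i (j+1) = 1) := by
    have e : ((j:ℤ) + 1) = ((j+1 : ℕ) : ℤ) := by omega
    rw [e, hg, hm]
    constructor
    · exact fun ⟨h1, h2⟩ => ⟨by exact_mod_cast h1, h2⟩
    · exact fun ⟨h1, h2⟩ => ⟨by exact_mod_cast h1, h2⟩
  rw [pvTA, hg, if_congr hup rfl rfl, if_congr hdown rfl rfl, if_congr hleft rfl rfl, if_congr hright rfl rfl]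
  by_cases h0 : pvG mat i j = 0
  · rw [if_pos h0]
    simp only [h0, true_and]
  · rw [if_neg h0]
    simp only [h0, false_and, if_false]
    norm_num

lemma pvTB_cast (mat : List (List Int)) (i j : ℕ) :
    pvTB mat ↑i ↑j =
      (if j+1 < (mat.getD 0 []).length ∧ ((pvG mat i j = 0 ∧ pvG mat i (j+1) = 1) ∨ (pvG mat i j = 1 ∧ pvG mat i (j+1) = 0)) then (1:ℤ) else 0)
      + (if i+1 < mat.length ∧ ((pvG mat i j = 0 ∧ pvG mat (i+1) j = 1) ∨ (pvG mat i j = 1 ∧ pvG mat (i+1) j = 0)) then 1 else 0) := by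
  have hg : ∀ a b : ℕ, PySem.List.pyGetD (PySem.List.pyGetD mat (↑a) []) (↑b) 0 = pvG mat a b := by
    intro a b; simp [pvG, PySem.List.pyGetD_natCast]
  have ei : ((i:ℤ) + 1) = ((i+1 : ℕ) : ℤ) := by omega
  have ej : ((j:ℤ) + 1) = ((j+1 : ℕ) : ℤ) := by omega
  have hm : (PySem.List.pyGetD mat 0 []).length = (mat.getD 0 []).length := by
    rw [PySem.List.pyGetD_zero]
  rw [pvTB, ei, ej, hg, hg, hg, hm]
  simp only [Nat.cast_lt]

lemma pv_shift (f : ℕ → ℤ) (M : ℕ) :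
    ∑ j ∈ Finset.range M, (if 1 ≤ j then f (j-1) else 0)
      = ∑ j ∈ Finset.range M, (if j+1 < M then f j else 0) := by
  cases M with
  | zero => simp
  | succ K =>
    rw [Finset.sum_range_succ' _ K, Finset.sum_range_succ]
    have h2 : ∀ x ∈ Finset.range K, (if x+1 < K+1 then f x else 0) = f x := by
      intro x hx; have hxK := Finset.mem_range.mp hx; rw [if_pos (by omega)]
    rw [Finset.sum_congr rfl h2]
    simp

lemma pv_grid (h : ℕ → ℕ → ℤ) (N M : ℕ) :
    (∑ i ∈ Finset.range N, ∑ j ∈ Finset.range M,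
      ((if h i j = 0 ∧ 1 ≤ i ∧ h (i-1) j = 1 then (1:ℤ) else 0)
      + (if h i j = 0 ∧ i+1 < N ∧ h (i+1) j = 1 then 1 else 0)
      + (if h i j = 0 ∧ 1 ≤ j ∧ h i (j-1) = 1 then 1 else 0)
      + (if h i j = 0 ∧ j+1 < M ∧ h i (j+1) = 1 then 1 else 0)))
    = ∑ i ∈ Finset.range N, ∑ j ∈ Finset.range M,
      ((if j+1 < M ∧ ((h i j = 0 ∧ h i (j+1) = 1) ∨ (h i j = 1 ∧ h i (j+1) = 0)) then (1:ℤ) else 0)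
      + (if i+1 < N ∧ ((h i j = 0 ∧ h (i+1) j = 1) ∨ (h i j = 1 ∧ h (i+1) j = 0)) then 1 else 0)) := by
  have hR : ∀ i j : ℕ,
      ((if j+1 < M ∧ ((h i j = 0 ∧ h i (j+1) = 1) ∨ (h i j = 1 ∧ h i (j+1) = 0)) then (1:ℤ) else 0)
      + (if i+1 < N ∧ ((h i j = 0 ∧ h (i+1) j = 1) ∨ (h i j = 1 ∧ h (i+1) j = 0)) then 1 else 0))
      = ((if j+1 < M ∧ h i j = 0 ∧ h i (j+1) = 1 then (1:ℤ) else 0)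
        + (if j+1 < M ∧ h i j = 1 ∧ h i (j+1) = 0 then 1 else 0))
        + ((if i+1 < N ∧ h i j = 0 ∧ h (i+1) j = 1 then 1 else 0)
        + (if i+1 < N ∧ h i j = 1 ∧ h (i+1) j = 0 then 1 else 0)) := by
    intro i j
    split_ifs <;> first | rfl | omega
  rw [Finset.sum_congr rfl (fun i _ => Finset.sum_congr rfl (fun j (_ : j ∈ Finset.range M) => hR i j))]
  simp only [Finset.sum_add_distrib]
  have hRight : (∑ i ∈ Finset.range N, ∑ j ∈ Finset.range M, (if h i j = 0 ∧ j+1 < M ∧ h i (j+1) = 1 then (1:ℤ) else 0))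
      = ∑ i ∈ Finset.range N, ∑ j ∈ Finset.range M, (if j+1 < M ∧ h i j = 0 ∧ h i (j+1) = 1 then (1:ℤ) else 0) :=
    Finset.sum_congr rfl fun i _ => Finset.sum_congr rfl fun j _ => if_congr (by tauto) rfl rfl
  have hDown : (∑ i ∈ Finset.range N, ∑ j ∈ Finset.range M, (if h i j = 0 ∧ i+1 < N ∧ h (i+1) j = 1 then (1:ℤ) else 0))
      = ∑ i ∈ Finset.range N, ∑ j ∈ Finset.range M, (if i+1 < N ∧ h i j = 0 ∧ h (i+1) j = 1 then (1:ℤ) else 0) :=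
    Finset.sum_congr rfl fun i _ => Finset.sum_congr rfl fun j _ => if_congr (by tauto) rfl rfl
  have oneD : ∀ (g : ℕ → ℤ) (K : ℕ),
      (∑ k ∈ Finset.range K, (if g k = 0 ∧ 1 ≤ k ∧ g (k-1) = 1 then (1:ℤ) else 0))
      = ∑ k ∈ Finset.range K, (if k+1 < K ∧ g k = 1 ∧ g (k+1) = 0 then (1:ℤ) else 0) := by
    intro g K
    have e1 : ∀ k, (if g k = 0 ∧ 1 ≤ k ∧ g (k-1) = 1 then (1:ℤ) else 0)
        = (if 1 ≤ k then (if g (k-1) = 1 ∧ g ((k-1)+1) = 0 then (1:ℤ) else 0) else 0) := by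
      intro k
      by_cases hk : 1 ≤ k
      · have ek : k - 1 + 1 = k := by omega
        rw [ek, if_pos hk]
        exact if_congr (by tauto) rfl rfl
      · have hk0 : k = 0 := by omega
        subst hk0; simp
    rw [Finset.sum_congr rfl (fun k (_ : k ∈ Finset.range K) => e1 k),
      pv_shift (fun k => if g k = 1 ∧ g (k+1) = 0 then (1:ℤ) else 0) K]
    exact Finset.sum_congr rfl fun k _ => by split_ifs <;> first | rfl | tauto
  have hLeft : (∑ i ∈ Finset.range N, ∑ j ∈ Finset.range M, (if h i j = 0 ∧ 1 ≤ j ∧ h i (j-1) = 1 then (1:ℤ) else 0))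
      = ∑ i ∈ Finset.range N, ∑ j ∈ Finset.range M, (if j+1 < M ∧ h i j = 1 ∧ h i (j+1) = 0 then (1:ℤ) else 0) :=
    Finset.sum_congr rfl fun i _ => oneD (fun j => h i j) M
  have hUp : (∑ i ∈ Finset.range N, ∑ j ∈ Finset.range M, (if h i j = 0 ∧ 1 ≤ i ∧ h (i-1) j = 1 then (1:ℤ) else 0))
      = ∑ i ∈ Finset.range N, ∑ j ∈ Finset.range M, (if i+1 < N ∧ h i j = 1 ∧ h (i+1) j = 0 then (1:ℤ) else 0) := by
    rw [Finset.sum_comm]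
    rw [Finset.sum_congr rfl (fun j (_ : j ∈ Finset.range M) => oneD (fun i => h i j) N)]
    exact Finset.sum_comm

  rw [hRight, hDown, hLeft, hUp]
  ring

-- ===== VERDICT (by name: the statement is the Claim_ definition above) =====
theorem coverageOfMatrix_spec : Claim_equal_coverageOfMatrix := by
  intro mat _ _
  unfold Spec_coverageOfMatrix
  rw [A_eq_sum, B_eq_sum]
  calc ∑ i ∈ Finset.range mat.length, ∑ j ∈ Finset.range (mat.getD 0 []).length, pvTA mat ↑i ↑j
      = ∑ i ∈ Finset.range mat.length, ∑ j ∈ Finset.range (mat.getD 0 []).length,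
          ((if pvG mat i j = 0 ∧ 1 ≤ i ∧ pvG mat (i-1) j = 1 then (1:ℤ) else 0)
          + (if pvG mat i j = 0 ∧ i+1 < mat.length ∧ pvG mat (i+1) j = 1 then 1 else 0)
          + (if pvG mat i j = 0 ∧ 1 ≤ j ∧ pvG mat i (j-1) = 1 then 1 else 0)
          + (if pvG mat i j = 0 ∧ j+1 < (mat.getD 0 []).length ∧ pvG mat i (j+1) = 1 then 1 else 0)) := by
        exact Finset.sum_congr rfl fun i _ => Finset.sum_congr rfl fun j _ => pvTA_cast mat i j
    _ = ∑ i ∈ Finset.range mat.length, ∑ j ∈ Finset.range (mat.getD 0 []).length,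
          ((if j+1 < (mat.getD 0 []).length ∧ ((pvG mat i j = 0 ∧ pvG mat i (j+1) = 1) ∨ (pvG mat i j = 1 ∧ pvG mat i (j+1) = 0)) then (1:ℤ) else 0)
          + (if i+1 < mat.length ∧ ((pvG mat i j = 0 ∧ pvG mat (i+1) j = 1) ∨ (pvG mat i j = 1 ∧ pvG mat (i+1) j = 0)) then 1 else 0)) :=
        pv_grid (pvG mat) mat.length (mat.getD 0 []).length
    _ = ∑ i ∈ Finset.range mat.length, ∑ j ∈ Finset.range (mat.getD 0 []).length, pvTB mat ↑i ↑j := by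
        exact Finset.sum_congr rfl fun i _ => Finset.sum_congr rfl fun j _ => (pvTB_cast mat i j).symm
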